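-- pv_equiv track=rewrite | github.com/aman1403/ML-Models-secured-with-Cryptography | Secret_Sharing/client0.py | lagrange_polynomials
-- ===== SOURCE A (Python) =====
-- PRIME = 19997
--
-- def base_egcd(a, b):
--     r0, r1 = a, b
--     s0, s1 = 1, 0
--     t0, t1 = 0, 1
--
--     while r1 != 0:
--         q, r2 = divmod(r0, r1)
--         r0, s0, t0, r1, s1, t1 = \
--             r1, s1, t1, \
--             r2, s0 - s1*q, t0 - t1*q
--
--     d = r0
--     s = s0
--     t = t0
--     return d, s, t
--
-- def base_inverse(a):
--     _, b, _ = base_egcd(a, PRIME)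
--     return b if b >= 0 else b+PRIME
--
-- def base_add(a, b):
--     return (a + b) % PRIME
--
-- def base_sub(a, b):
--     return (a - b) % PRIME
--
-- def base_mul(a, b):
--     return (a * b) % PRIME
--
-- def base_div(a, b):
--     return base_mul(a, base_inverse(b))
--
-- def canonical(A):
--     for i in reversed(range(len(A))):
--         if A[i] != 0:
--             return A[:i+1]
--     return []
--
-- def poly_scalardiv(A, b):
--     return canonical([ base_div(a, b) for a in A ])
--
-- def poly_mul(A, B):
--     C = [0] * (len(A) + len(B) - 1)
--     for i in range(len(A)):
--         for j in range(len(B)):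
--             C[i+j] = base_add(C[i+j], base_mul(A[i], B[j]))
--     return canonical(C)
--
-- def lagrange_polynomials(xs):
--     polys = []
--     for i, xi in enumerate(xs):
--         numerator = [1]
--         denominator = 1
--         for j, xj in enumerate(xs):
--             if i == j: continue
--             numerator   = poly_mul(numerator, [base_sub(0, xj), 1])
--             denominator = base_mul(denominator, base_sub(xi, xj))
--         poly = poly_scalardiv(numerator, denominator)
--         polys.append(poly)
--     return polys
-- ===== SOURCE B (Python) =====
-- PRIME = 19997
--
-- def _egcd(a, b):
--     r0, r1 = a, b
--     s0, s1 = 1, 0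
--     t0, t1 = 0, 1
--     while r1 != 0:
--         q, r2 = divmod(r0, r1)
--         r0, s0, t0, r1, s1, t1 = r1, s1, t1, r2, s0 - s1*q, t0 - t1*q
--     return r0, s0, t0
--
-- def _inv(a):
--     _, b, _ = _egcd(a, PRIME)
--     return b if b >= 0 else b + PRIME
--
-- def _mulx(A, s):
--     # multiply polynomial A (ascending coefficients) by (x + s), mod PRIME
--     out = [A[0] * s % PRIME]
--     for k in range(1, len(A)):
--         out.append((A[k-1] + A[k] * s % PRIME) % PRIME)
--     out.append(A[len(A)-1])
--     return out
--
-- def _synthdiv(full, r):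
--     # exact quotient of full (monic, ascending) by (x - r), mod PRIME
--     q = []
--     acc = 0
--     for c in reversed(full[1:]):
--         acc = (acc * r + c) % PRIME
--         q.append(acc)
--     q.reverse()
--     return q
--
-- def _eval(A, r):
--     acc = 0
--     for c in reversed(A):
--         acc = (acc * r + c) % PRIME
--     return acc
--
-- def _trim(A):
--     out = list(A)
--     while out and out[-1] == 0:
--         out.pop()
--     return out
--
-- def lagrange_polynomials(xs):
--     full = [1]
--     for x in xs:
--         full = _mulx(full, (-x) % PRIME)
--     polys = []
--     for xi in xs:
--         r = xi % PRIME
--         q = _synthdiv(full, r)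
--         d = _eval(q, r)
--         v = _inv(d)
--         polys.append(_trim([c * v % PRIME for c in q]))
--     return polys
-- ===== Notes on version B (the rewrite author's own statement) =====
-- stated objective: faster
-- what changed: Instead of rebuilding each numerator polynomial from scratch with quadratic poly_mul per node (O(n^3) total), B multiplies out the full product prod(x - xj) once and obtains each numerator by one synthetic division of that product by (x - xi), with the denominator recovered as a Horner evaluation of the quotient at xi (O(n^2) total).
import Mathlib
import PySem

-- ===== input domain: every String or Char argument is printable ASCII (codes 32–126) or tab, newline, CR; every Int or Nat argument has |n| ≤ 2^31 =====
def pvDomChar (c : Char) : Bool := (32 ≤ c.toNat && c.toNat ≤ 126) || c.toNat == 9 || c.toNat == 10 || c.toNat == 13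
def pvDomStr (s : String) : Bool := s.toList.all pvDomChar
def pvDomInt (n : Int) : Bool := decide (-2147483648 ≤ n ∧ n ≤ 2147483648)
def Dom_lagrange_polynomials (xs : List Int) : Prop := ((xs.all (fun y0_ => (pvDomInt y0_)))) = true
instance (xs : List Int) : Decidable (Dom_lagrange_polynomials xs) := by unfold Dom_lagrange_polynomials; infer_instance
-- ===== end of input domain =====

-- B replaces A's per-node O(n^2) polynomial rebuilds (O(n^3) total) by one full product
-- prod (x - xj) and a synthetic division per node (O(n^2) total); return values are identical.

-- ===== PORT A =====
def PRIME : Int := 19997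

-- termination measure for the egcd while-loop (cited in decreasing_by)
lemma pvModAbsLt (a b : Int) (h : b ≠ 0) : (PySem.Int.mod a b).natAbs < b.natAbs := by
  rcases lt_trichotomy b 0 with hb | hb | hb
  · have := PySem.Int.mod_neg_bounds a hb
    omega
  · exact absurd hb h
  · have h1 := PySem.Int.mod_nonneg a hb
    have h2 := PySem.Int.mod_lt a hb
    omega

def base_egcd_loop (r0 s0 t0 r1 s1 t1 : Int) : Int × Int × Int :=
  if h : r1 ≠ 0 then
    base_egcd_loop r1 s1 t1 (PySem.Int.mod r0 r1)
      (s0 - s1 * PySem.Int.floordiv r0 r1) (t0 - t1 * PySem.Int.floordiv r0 r1)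
  else (r0, s0, t0)
termination_by r1.natAbs
decreasing_by exact pvModAbsLt r0 r1 h

def base_egcd (a b : Int) : Int × Int × Int := base_egcd_loop a 1 0 b 0 1

def base_inverse (a : Int) : Int :=
  if (base_egcd a PRIME).2.1 ≥ 0 then (base_egcd a PRIME).2.1 else (base_egcd a PRIME).2.1 + PRIME

def base_add (a b : Int) : Int := PySem.Int.mod (a + b) PRIME
def base_sub (a b : Int) : Int := PySem.Int.mod (a - b) PRIME
def base_mul (a b : Int) : Int := PySem.Int.mod (a * b) PRIME
def base_div (a b : Int) : Int := base_mul a (base_inverse b)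

-- 'for i in reversed(range(len(A))): if A[i] != 0: return A[:i+1]' ; i is always in range, so A[i] = A.getD i 0
def canonicalGo (A : List Int) : Nat → List Int
  | 0 => []
  | m+1 => if A.getD m 0 ≠ 0 then A.take (m+1) else canonicalGo A m

def canonical (A : List Int) : List Int := canonicalGo A A.length

def poly_scalardiv (A : List Int) (b : Int) : List Int := canonical (A.map (fun a => base_div a b))

-- nested 'for i in range(len(A)): for j in range(len(B))' with updates C[i+j] = …; bounds are Nat, so List.range is exact
def poly_mul (A B : List Int) : List Int :=
  canonical ((List.range A.length).foldl (fun C i =>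
      (List.range B.length).foldl (fun C j =>
        C.set (i+j) (base_add (C.getD (i+j) 0) (base_mul (A.getD i 0) (B.getD j 0)))) C)
    (List.replicate (A.length + B.length - 1) 0))

def lagrange_polynomials (xs : List Int) : List (List Int) :=
  (PySem.List.enumerate xs 0).foldl (fun polys p =>
    polys ++ [(fun nd => poly_scalardiv nd.1 nd.2)
      ((PySem.List.enumerate xs 0).foldl (fun (nd : List Int × Int) q =>
        if p.1 == q.1 then nd
        else (poly_mul nd.1 [base_sub 0 q.2, 1], base_mul nd.2 (base_sub p.2 q.2))) ([1], 1))]) []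

-- ===== PORT B =====
-- Source B's _egcd/_inv are the identical extended-Euclid helpers; the Lean defs base_egcd/base_inverse are shared.

-- _mulx: out = [A[0]*s % P]; for k in 1..len-1: append (A[k-1] + A[k]*s % P) % P; append A[-1]
-- ported as structural recursion carrying the previous coefficient (never called on [])
def pvStep2 (s : Int) : Int → List Int → List Int
  | prev, [] => [prev]
  | prev, b :: t => PySem.Int.mod (prev + PySem.Int.mod (b * s) PRIME) PRIME :: pvStep2 s b t

def pvMulx (A : List Int) (s : Int) : List Int :=
  match A with
  | [] => []
  | a :: t => PySem.Int.mod (a * s) PRIME :: pvStep2 s a t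

-- _synthdiv: Horner pass over reversed(full[1:]) appending each acc, then reverse
def pvSynthdiv (full : List Int) (r : Int) : List Int :=
  ((((full.drop 1).reverse).foldl
      (fun (st : Int × List Int) c =>
        (PySem.Int.mod (st.1 * r + c) PRIME, st.2 ++ [PySem.Int.mod (st.1 * r + c) PRIME]))
      (0, [])).2).reverse

-- _eval: Horner evaluation, 'for c in reversed(A)'
def pvEval (A : List Int) (r : Int) : Int :=
  (A.reverse).foldl (fun acc c => PySem.Int.mod (acc * r + c) PRIME) 0

-- _trim: pop trailing zeros = drop the leading zeros of the reversed list
def pvTrim (A : List Int) : List Int := ((A.reverse).dropWhile (fun c => c == 0)).reverse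

def lagrange_polynomials_alt (xs : List Int) : List (List Int) :=
  let full := xs.foldl (fun A x => pvMulx A (PySem.Int.mod (-x) PRIME)) [1]
  xs.foldl (fun polys xi =>
    polys ++ [(fun q => pvTrim (q.map (fun c => PySem.Int.mod (c * base_inverse (pvEval q (PySem.Int.mod xi PRIME))) PRIME)))
      (pvSynthdiv full (PySem.Int.mod xi PRIME))]) []

-- ===== PRECONDITION & SPEC =====
def Spec_lagrange_polynomials (xs : List Int) (out : List (List Int)) : Prop := out = lagrange_polynomials_alt xs
instance (xs : List Int) (out : List (List Int)) : Decidable (Spec_lagrange_polynomials xs out) := by unfold Spec_lagrange_polynomials; infer_instance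

-- ===== CLAIM (what is proved, stated in full; the proofs are below) =====
def Claim_equal_lagrange_polynomials : Prop := ∀ (xs : List Int), Dom_lagrange_polynomials xs → Spec_lagrange_polynomials xs (lagrange_polynomials xs)

-- ===== LEMMAS AND PROOFS =====

-- mod toolkit ---------------------------------------------------------------
lemma pmod (x : Int) : PySem.Int.mod x PRIME = x % 19997 :=
  PySem.Int.mod_eq_emod_of_pos (by norm_num [PRIME])

lemma pvBridge {a b : ℤ} (h : (a : ZMod 19997) = (b : ZMod 19997)) : a % 19997 = b % 19997 :=
  (ZMod.intCast_eq_intCast_iff a b 19997).mp h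

lemma pvCastMod (a : ℤ) : ((a % 19997 : ℤ) : ZMod 19997) = (a : ZMod 19997) := by
  exact_mod_cast ZMod.intCast_mod a 19997

lemma pvModBounds (x : ℤ) : 0 ≤ x % 19997 ∧ x % 19997 < 19997 :=
  ⟨Int.emod_nonneg x (by norm_num), Int.emod_lt_of_pos x (by norm_num)⟩

lemma pvModId {x : ℤ} (h1 : 0 ≤ x) (h2 : x < 19997) : x % 19997 = x := Int.emod_eq_of_lt h1 h2

-- invariants ---------------------------------------------------------------
def Red (A : List Int) : Prop := ∀ c ∈ A, 0 ≤ c ∧ c < 19997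
def Good (A : List Int) : Prop := Red A ∧ A ≠ [] ∧ A.getLast? = some 1

-- coefficient formula ------------------------------------------------------
def pvCF (A : List Int) (s : Int) (k : Nat) : Int :=
  ((if k = 0 then 0 else A.getD (k-1) 0) + A.getD k 0 * s % 19997) % 19997

lemma len_pvStep2 (s prev : Int) (t : List Int) : (pvStep2 s prev t).length = t.length + 1 := by
  induction t generalizing prev with
  | nil => rfl
  | cons b t ih => simp [pvStep2, ih]

lemma len_pvMulx (A : List Int) (s : Int) (h : A ≠ []) : (pvMulx A s).length = A.length + 1 := by
  cases A with
  | nil => exact absurd rfl h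
  | cons a t => simp [pvMulx, len_pvStep2]

lemma ne_pvMulx (A : List Int) (s : Int) (h : A ≠ []) : pvMulx A s ≠ [] := by
  cases A with
  | nil => exact absurd rfl h
  | cons a t => simp [pvMulx]

lemma red_pvStep2 (s prev : Int) (t : List Int) (hp : 0 ≤ prev ∧ prev < 19997) (ht : Red t) :
    Red (pvStep2 s prev t) := by
  induction t generalizing prev with
  | nil => intro c hc; simp only [pvStep2, List.mem_singleton] at hc; omega
  | cons b t ih =>
    intro c hc
    simp only [pvStep2, List.mem_cons] at hc
    rcases hc with h | h
    · subst h; rw [pmod]; exact pvModBounds _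
    · exact ih b ⟨(ht b (by simp)).1, (ht b (by simp)).2⟩ (fun c hc => ht c (by simp [hc])) c h

lemma red_pvMulx (A : List Int) (s : Int) (hA : Red A) : Red (pvMulx A s) := by
  cases A with
  | nil => intro c hc; simp [pvMulx] at hc
  | cons a t =>
    intro c hc
    simp only [pvMulx, List.mem_cons] at hc
    rcases hc with h | h
    · subst h; rw [pmod]; exact pvModBounds _
    · exact red_pvStep2 s a t ⟨(hA a (by simp)).1, (hA a (by simp)).2⟩
        (fun c hc => hA c (by simp [hc])) c h

lemma ne_pvStep2 (s prev : Int) (t : List Int) : pvStep2 s prev t ≠ [] := by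
  cases t <;> simp [pvStep2]

lemma getLast?_cons_ne (y : ℤ) (l : List ℤ) (h : l ≠ []) : (y :: l).getLast? = l.getLast? := by
  rcases l with _ | ⟨a, t⟩
  · exact absurd rfl h
  · exact List.getLast?_cons_cons ..

lemma getLast?_pvStep2 (s prev : Int) (t : List Int) :
    (pvStep2 s prev t).getLast? = (prev :: t).getLast? := by
  induction t generalizing prev with
  | nil => rfl
  | cons b t ih =>
    show (_ :: pvStep2 s b t).getLast? = _
    rw [getLast?_cons_ne _ _ (ne_pvStep2 s b t), ih b, List.getLast?_cons_cons]

lemma getLast?_pvMulx (A : List Int) (s : Int) (h : A ≠ []) :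
    (pvMulx A s).getLast? = A.getLast? := by
  cases A with
  | nil => exact absurd rfl h
  | cons a t =>
    show (_ :: pvStep2 s a t).getLast? = _
    rw [getLast?_cons_ne _ _ (ne_pvStep2 s a t), getLast?_pvStep2]

lemma good_pvMulx (A : List Int) (s : Int) (h : Good A) : Good (pvMulx A s) :=
  ⟨red_pvMulx A s h.1, ne_pvMulx A s h.2.1, by rw [getLast?_pvMulx A s h.2.1]; exact h.2.2⟩

lemma good_fold (l : List Int) (z : List Int) (h : Good z) : Good (l.foldl pvMulx z) := by
  induction l generalizing z with
  | nil => exact h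
  | cons a l ih => exact ih _ (good_pvMulx z a h)

-- cf formula ---------------------------------------------------------------
lemma cf_pvStep2 (s prev : Int) (t : List Int) (hp : 0 ≤ prev ∧ prev < 19997) (ht : Red t) (k : Nat) :
    (pvStep2 s prev t).getD k 0 =
      ((if k = 0 then prev else t.getD (k-1) 0) + t.getD k 0 * s % 19997) % 19997 := by
  induction t generalizing prev k with
  | nil =>
    cases k with
    | zero => simp [pvStep2, pvModId hp.1 hp.2]
    | succ k => simp [pvStep2, List.getD]
  | cons b t ih =>
    cases k with
    | zero => simp [pvStep2, pmod]
    | succ k =>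
      have hb : 0 ≤ b ∧ b < 19997 := ht b (by simp)
      have ht' : Red t := fun c hc => ht c (by simp [hc])
      simp only [pvStep2, List.getD_cons_succ]
      rw [ih b hb ht' k]
      cases k with
      | zero => simp
      | succ k => simp

lemma cf_pvMulx (A : List Int) (s : Int) (hA : Red A) (hne : A ≠ []) (k : Nat) :
    (pvMulx A s).getD k 0 = pvCF A s k := by
  cases A with
  | nil => exact absurd rfl hne
  | cons a t =>
    have ha : 0 ≤ a ∧ a < 19997 := hA a (by simp)
    have ht : Red t := fun c hc => hA c (by simp [hc])
    cases k with
    | zero =>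
      simp only [pvMulx, List.getD_cons_zero, pvCF, pmod]
      apply pvBridge; push_cast [pvCastMod]; ring
    | succ k =>
      simp only [pvMulx, List.getD_cons_succ, pvCF]
      rw [cf_pvStep2 s a t ha ht k]
      cases k with
      | zero => simp
      | succ k => simp

-- the symmetric mod identity behind commutation
lemma pvKey (x y z a b : ℤ) :
    ((x + y*a%19997)%19997 + ((y + z*a%19997)%19997 * b)%19997)%19997 =
    ((x + y*b%19997)%19997 + ((y + z*b%19997)%19997 * a)%19997)%19997 := by
  apply pvBridge; push_cast [pvCastMod]; ring

lemma comm_pvMulx (A : List Int) (a b : Int) (hA : Red A) (hne : A ≠ []) :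
    pvMulx (pvMulx A a) b = pvMulx (pvMulx A b) a := by
  have h1 : Red (pvMulx A a) := red_pvMulx A a hA
  have h2 : Red (pvMulx A b) := red_pvMulx A b hA
  have n1 : pvMulx A a ≠ [] := ne_pvMulx A a hne
  have n2 : pvMulx A b ≠ [] := ne_pvMulx A b hne
  apply List.ext_getElem
  · rw [len_pvMulx _ _ n1, len_pvMulx _ _ n2, len_pvMulx _ _ hne, len_pvMulx _ _ hne]
  · intro i hi1 hi2
    rw [← List.getD_eq_getElem _ 0 hi1, ← List.getD_eq_getElem _ 0 hi2,
      cf_pvMulx _ b h1 n1 i, cf_pvMulx _ a h2 n2 i]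
    unfold pvCF
    rw [cf_pvMulx A a hA hne, cf_pvMulx A a hA hne, cf_pvMulx A b hA hne, cf_pvMulx A b hA hne]
    unfold pvCF
    rcases i with _ | _ | k
    · simpa using pvKey 0 0 (A.getD 0 0) a b
    · simpa using pvKey 0 (A.getD 0 0) (A.getD 1 0) a b
    · simpa using pvKey (A.getD k 0) (A.getD (k+1) 0) (A.getD (k+2) 0) a b

lemma fold_swap (l : List Int) (z : List Int) (a : Int) (h : Good z) :
    l.foldl pvMulx (pvMulx z a) = pvMulx (l.foldl pvMulx z) a := by
  induction l generalizing z a with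
  | nil => rfl
  | cons b l ih =>
    simp only [List.foldl_cons]
    rw [comm_pvMulx z a b h.1 h.2.1, ih _ _ (good_pvMulx z b h)]

lemma fold_middle (l1 l2 : List Int) (a : Int) (z : List Int) (h : Good z) :
    (l1 ++ a :: l2).foldl pvMulx z = pvMulx ((l1 ++ l2).foldl pvMulx z) a := by
  induction l1 generalizing z with
  | nil => simpa using fold_swap l2 z a h
  | cons b l1 ih => simpa using ih (pvMulx z b) (good_pvMulx z b h)

-- synthetic division inverts multiplication by a monic linear factor --------
lemma pvReduceRoot (u b r s : ℤ) (hu : 0 ≤ u ∧ u < 19997) (hdvd : (19997:ℤ) ∣ (r + s)) :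
    (b*r + (u + b*s%19997)%19997)%19997 = u := by
  obtain ⟨c, hc⟩ := hdvd
  rw [show u = u % 19997 from (pvModId hu.1 hu.2).symm]
  apply pvBridge; push_cast [pvCastMod]
  have hcc : (r : ZMod 19997) + s = 19997 * c := by exact_mod_cast congrArg (Int.cast : ℤ → ZMod 19997) hc
  have h0 : ((19997:ℤ) : ZMod 19997) = 0 := by decide
  push_cast at h0
  linear_combination (b : ZMod 19997) * hcc + (b * c : ZMod 19997) * h0

lemma synth_aux (r s : Int) (hdvd : (19997:ℤ) ∣ (r + s)) (t : List Int) (prev : Int)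
    (hp : 0 ≤ prev ∧ prev < 19997) (ht : Red t) :
    (pvStep2 s prev t).foldr
      (fun c (st : Int × List Int) => ((st.1 * r + c) % 19997, st.2 ++ [(st.1 * r + c) % 19997]))
      (0, []) = (prev, (prev :: t).reverse) := by
  induction t generalizing prev with
  | nil => simp [pvStep2, pvModId hp.1 hp.2]
  | cons b t ih =>
    have hb : 0 ≤ b ∧ b < 19997 := ht b (by simp)
    have ht' : Red t := fun c hc => ht c (by simp [hc])
    simp only [pvStep2, List.foldr_cons, ih b hb ht', pmod]
    rw [pvReduceRoot prev b r s hp hdvd]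
    simp

lemma synthdiv_pvMulx (N : List Int) (r s : Int) (hN : Red N) (hne : N ≠ [])
    (hdvd : (19997:ℤ) ∣ (r + s)) : pvSynthdiv (pvMulx N s) r = N := by
  rcases N with _ | ⟨a, t⟩
  · exact absurd rfl hne
  have ha : 0 ≤ a ∧ a < 19997 := hN a (by simp)
  have ht : Red t := fun c hc => hN c (by simp [hc])
  unfold pvSynthdiv
  simp only [pvMulx, List.drop_succ_cons, List.drop_zero, List.foldl_reverse, pmod]
  rw [synth_aux r s hdvd t a ha ht]
  simp

-- Horner evaluation is multiplicative on monic linear factors ----------------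
lemma eval_step2 (r s : Int) (t : List Int) (prev : Int) :
    (pvStep2 s prev t).foldr (fun c acc => (acc * r + c) % 19997) 0 =
      (prev + (t.foldr (fun c acc => (acc * r + c) % 19997) 0) * (r + s)) % 19997 := by
  induction t generalizing prev with
  | nil => simp [pvStep2]
  | cons b t ih =>
    simp only [pvStep2, List.foldr_cons, ih b, pmod]
    apply pvBridge; push_cast [pvCastMod]; ring

lemma pvEval_eq_foldr (A : List Int) (r : Int) :
    pvEval A r = A.foldr (fun c acc => (acc * r + c) % 19997) 0 := by
  simp [pvEval, List.foldl_reverse, pmod]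

lemma eval_pvMulx (A : List Int) (s r : Int) (h : A ≠ []) :
    pvEval (pvMulx A s) r = (pvEval A r * (r + s)) % 19997 := by
  cases A with
  | nil => exact absurd rfl h
  | cons a t =>
    rw [pvEval_eq_foldr, pvEval_eq_foldr]
    simp only [pvMulx, List.foldr_cons, eval_step2 r s t a, pmod]
    apply pvBridge; push_cast [pvCastMod]; ring

lemma eval_fold (l : List Int) (z : List Int) (r : Int) (h : z ≠ []) :
    pvEval (l.foldl pvMulx z) r =
      l.foldl (fun d s => (d * (r + s)) % 19997) (pvEval z r) := by
  induction l generalizing z with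
  | nil => rfl
  | cons a l ih =>
    simp only [List.foldl_cons]
    rw [ih _ (ne_pvMulx z a h), eval_pvMulx z a r h]

lemma eval_one (r : Int) : pvEval [1] r = 1 := by
  rw [pvEval_eq_foldr]; norm_num

-- poly_mul on a monic linear factor is pvMulx -------------------------------
lemma pvMulx_eq_map (A : List Int) (s : Int) (hA : Red A) (hne : A ≠ []) :
    pvMulx A s = (List.range A.length).map (pvCF A s) ++ [A.getD (A.length - 1) 0] := by
  have hn : A.length ≠ 0 := by simpa using hne
  apply List.ext_getElem
  · simp [len_pvMulx A s hne]
  · intro i hi1 hi2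
    rw [← List.getD_eq_getElem _ 0 hi1, cf_pvMulx A s hA hne i]
    rcases Nat.lt_or_ge i A.length with h | h
    · rw [List.getElem_append_left (by simpa using h)]
      simp
    · have hi : i = A.length := by
        rw [len_pvMulx A s hne] at hi1; omega
      subst hi
      rw [List.getElem_append_right (by simpa using h)]
      have h0 : A.getD A.length 0 = 0 := List.getD_eq_default _ _ le_rfl
      have hmem : A.getD (A.length - 1) 0 ∈ A := by
        rw [List.getD_eq_getElem _ _ (by omega)]; exact List.getElem_mem _
      have hb := hA _ hmem
      simp only [List.getElem_singleton, pvCF, if_neg hn, h0, zero_mul, Int.zero_emod, add_zero]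
      exact pvModId hb.1 hb.2

lemma canonical_getLast (A : List Int) (x : Int) (h : A.getLast? = some x) (hx : x ≠ 0) :
    canonical A = A := by
  have hne : A ≠ [] := by rintro rfl; simp at h
  have hlen : A.length ≠ 0 := by simpa using hne
  obtain ⟨m, hm⟩ : ∃ m, A.length = m + 1 := ⟨A.length - 1, by omega⟩
  have hgd : A.getD m 0 = x := by
    rw [List.getLast?_eq_getElem?, List.getElem?_eq_getElem (by omega)] at h
    rw [List.getD_eq_getElem _ _ (by omega)]
    have hx2 : A[A.length - 1] = x := by simpa using h
    simpa [hm] using hx2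
  unfold canonical
  rw [hm]
  show (if A.getD m 0 ≠ 0 then A.take (m+1) else canonicalGo A m) = A
  rw [if_pos (by rw [hgd]; exact hx), ← hm, List.take_length]

lemma poly_mul_lin (A : List Int) (s : Int) (h : Good A) : poly_mul A [s, 1] = pvMulx A s := by
  obtain ⟨hA, hne, hlast⟩ := h
  have hn : A.length ≠ 0 := by simpa using hne
  have inv : ∀ m, m ≤ A.length →
      (List.range m).foldl (fun C i => (List.range ([s,(1:Int)].length)).foldl (fun C j =>
          C.set (i+j) (base_add (C.getD (i+j) 0) (base_mul (A.getD i 0) ([s,1].getD j 0)))) C)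
        (List.replicate (A.length + [s,(1:Int)].length - 1) 0) =
      (List.range m).map (pvCF A s) ++
        ((if m = 0 then 0 else A.getD (m-1) 0) :: List.replicate (A.length - m) 0) := by
    intro m
    induction m with
    | zero =>
      intro _
      simp [List.replicate_succ]
    | succ m ih =>
      intro hm
      have hmlt : m < A.length := by omega
      have hAm : 0 ≤ A.getD m 0 ∧ A.getD m 0 < 19997 := by
        apply hA
        rw [List.getD_eq_getElem _ _ hmlt]; exact List.getElem_mem _
      rw [List.range_succ, List.foldl_append, List.foldl_cons, List.foldl_nil, ih (by omega)]
      show (List.foldl _ _ [0, 1]) = _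
      rw [List.foldl_cons, List.foldl_cons, List.foldl_nil]
      have hlenpre : ((List.range m).map (pvCF A s)).length = m := by simp
      have hzer : (A.length - m) = (A.length - m - 1) + 1 := by omega
      rw [hzer, List.replicate_succ]
      -- first update, at index m + 0
      rw [show m + 0 = ((List.range m).map (pvCF A s)).length + 0 by rw [hlenpre],
        List.getD_append_right _ _ _ _ (by omega), List.set_append_right _ _ (by omega)]
      simp only [Nat.add_sub_cancel_left]
      rw [List.getD_cons_zero, List.set_cons_zero]
      -- second update, at index m + 1
      rw [show m + 1 = ((List.range m).map (pvCF A s)).length + 1 by rw [hlenpre],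
        List.getD_append_right _ _ _ _ (by omega), List.set_append_right _ _ (by omega)]
      simp only [Nat.add_sub_cancel_left]
      rw [List.getD_cons_succ, List.getD_cons_zero, List.set_cons_succ, List.set_cons_zero]
      simp only [List.getD_cons_zero, List.getD_cons_succ]
      -- values
      have hv1 : base_add (if m = 0 then 0 else A.getD (m-1) 0) (base_mul (A.getD m 0) s) = pvCF A s m := by
        simp only [base_add, base_mul, pmod, pvCF]
      have hv2 : base_add 0 (base_mul (A.getD m 0) 1) = A.getD m 0 := by
        simp only [base_add, base_mul, pmod, mul_one, zero_add]
        rw [Int.emod_emod_of_dvd _ dvd_rfl, pvModId hAm.1 hAm.2]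
      rw [hv1, hv2]
      simp [hlenpre, Nat.sub_sub]
  have hfin := inv A.length le_rfl
  unfold poly_mul
  rw [hfin]
  simp only [if_neg hn, Nat.sub_self, List.replicate_zero]
  rw [← pvMulx_eq_map A s hA hne]
  apply canonical_getLast _ 1
  · rw [getLast?_pvMulx A s hne]; exact hlast
  · norm_num

-- canonical = trim ----------------------------------------------------------
lemma canonicalGo_trim (A : List Int) (m : Nat) (hm : m ≤ A.length) :
    canonicalGo A m = ((A.take m).reverse.dropWhile (fun c => c == 0)).reverse := by
  induction m with
  | zero => simp [canonicalGo]
  | succ m ih =>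
    have hm' : m < A.length := by omega
    have htake : A.take (m+1) = A.take m ++ [A[m]] := by
      rw [List.take_add_one, List.getElem?_eq_getElem hm']; rfl
    show (if A.getD m 0 ≠ 0 then A.take (m+1) else canonicalGo A m) = _
    rw [List.getD_eq_getElem _ _ hm', htake, List.reverse_append]
    simp only [List.reverse_cons, List.reverse_nil, List.nil_append, List.cons_append,
      List.dropWhile_cons]
    by_cases h : A[m] = 0
    · rw [if_neg (by simpa using h), if_pos (by simpa using h)]
      exact ih (by omega)
    · rw [if_pos h, if_neg (by simpa using h)]
      rw [List.reverse_cons, List.reverse_reverse]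

lemma canonical_eq_trim (A : List Int) : canonical A = pvTrim A := by
  have := canonicalGo_trim A A.length le_rfl
  simpa [canonical, pvTrim, List.take_length] using this

-- selecting all but index k from enumerate ----------------------------------
lemma enum_sel (xs : List Int) (k : Nat) (hk : k < xs.length) :
    ((PySem.List.enumerate xs 0).filter (fun q => !((k:Int) == q.1))).map (fun q => q.2) =
      xs.take k ++ xs.drop (k+1) := by
  have hxs : xs = xs.take k ++ xs[k] :: xs.drop (k+1) := by
    conv_lhs => rw [← List.take_append_drop k xs, List.drop_eq_getElem_cons hk]
  have hlen : (xs.take k).length = k := by simp [List.length_take]; omega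
  conv_lhs => rw [hxs]
  rw [PySem.List.enumerate_append, PySem.List.enumerate_cons, List.filter_append, List.filter_cons]
  have h1 : (PySem.List.enumerate (xs.take k) 0).filter (fun q => !((k:Int) == q.1)) =
      PySem.List.enumerate (xs.take k) 0 := by
    rw [List.filter_eq_self]
    intro p hp
    obtain ⟨j, hj, rfl⟩ := (PySem.List.mem_enumerate_iff _ 0 p).mp hp
    rw [hlen] at hj
    simp only [Bool.not_eq_eq_eq_not, Bool.not_true, beq_eq_false_iff_ne, ne_eq]
    intro hc
    omega
  have hhead : (!((k:Int) == ((0 : Int) + ((xs.take k).length : Int), xs[k]).1)) = false := by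
    simp [hlen]
  rw [h1, hhead]
  simp only [Bool.false_eq_true, if_false]
  have h2 : (PySem.List.enumerate (xs.drop (k+1)) ((0 : Int) + ((xs.take k).length : Int) + 1)).filter
      (fun q => !((k:Int) == q.1)) = PySem.List.enumerate (xs.drop (k+1)) ((0 : Int) + ((xs.take k).length : Int) + 1) := by
    rw [List.filter_eq_self]
    intro p hp
    obtain ⟨j, hj, rfl⟩ := (PySem.List.mem_enumerate_iff _ _ p).mp hp
    simp only [Bool.not_eq_eq_eq_not, Bool.not_true, beq_eq_false_iff_ne, ne_eq, hlen]
    intro hc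
    omega
  rw [h2, List.map_append, PySem.List.map_snd_enumerate, PySem.List.map_snd_enumerate]

-- the A-side numerator fold is the pvMulx fold ------------------------------
lemma numer_fold (l : List Int) (z : List Int) (h : Good z) :
    l.foldl (fun N x => poly_mul N [base_sub 0 x, 1]) z = l.foldl (fun N x => pvMulx N (base_sub 0 x)) z := by
  induction l generalizing z with
  | nil => rfl
  | cons a l ih =>
    simp only [List.foldl_cons]
    rw [poly_mul_lin z (base_sub 0 a) h, ih _ (good_pvMulx z (base_sub 0 a) h)]

lemma good_one : Good [1] :=
  ⟨fun c hc => by simp at hc; omega, by simp, by simp⟩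

-- the per-index basis polynomials agree -------------------------------------
lemma basis_eq (xs : List Int) (k : Nat) (hk : k < xs.length) :
    (fun nd => poly_scalardiv nd.1 nd.2)
      ((PySem.List.enumerate xs 0).foldl (fun (nd : List Int × Int) q =>
        if ((k:Int), xs[k]).1 == q.1 then nd
        else (poly_mul nd.1 [base_sub 0 q.2, 1], base_mul nd.2 (base_sub ((k:Int), xs[k]).2 q.2))) ([1], 1)) =
    (fun q => pvTrim (q.map (fun c => PySem.Int.mod (c * base_inverse (pvEval q (PySem.Int.mod xs[k] PRIME))) PRIME)))
      (pvSynthdiv (xs.foldl (fun A x => pvMulx A (PySem.Int.mod (-x) PRIME)) [1]) (PySem.Int.mod xs[k] PRIME)) := by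
  have hneg : ∀ x : Int, base_sub 0 x = PySem.Int.mod (-x) PRIME := by
    intro x; simp only [base_sub, zero_sub]
  set nf : Int → Int := fun x => PySem.Int.mod (-x) PRIME with hnf
  set r : Int := PySem.Int.mod xs[k] PRIME with hr
  set L : List Int := xs.take k ++ xs.drop (k+1) with hL
  -- A-side inner fold: skip-if = filter, pairs split componentwise
  have hif : ∀ (nd : List Int × Int) (q : Int × Int),
      (if (((k:Int), xs[k]).1 == q.1) then nd
       else (poly_mul nd.1 [base_sub 0 q.2, 1], base_mul nd.2 (base_sub (((k:Int), xs[k]).2) q.2)))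
      = (if !((k:Int) == q.1) then (poly_mul nd.1 [base_sub 0 q.2, 1], base_mul nd.2 (base_sub xs[k] q.2)) else nd) := by
    intro nd q
    rcases hb : ((k:Int) == q.1) <;> simp [hb]

  rw [show ((PySem.List.enumerate xs 0).foldl (fun (nd : List Int × Int) q =>
        if (((k:Int), xs[k]).1 == q.1) then nd
        else (poly_mul nd.1 [base_sub 0 q.2, 1], base_mul nd.2 (base_sub (((k:Int), xs[k]).2) q.2))) ([1], 1))
      = ((PySem.List.enumerate xs 0).foldl (fun (nd : List Int × Int) q =>
        if !((k:Int) == q.1) then (poly_mul nd.1 [base_sub 0 q.2, 1], base_mul nd.2 (base_sub xs[k] q.2)) else nd) ([1], 1))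
      from List.foldl_ext _ _ _ (by intro nd q _; exact hif nd q)]
  rw [PySem.List.foldl_if_eq_foldl_filter (fun q => !((k:Int) == q.1))
    (fun (nd : List Int × Int) q => (poly_mul nd.1 [base_sub 0 q.2, 1], base_mul nd.2 (base_sub xs[k] q.2)))
    (PySem.List.enumerate xs 0) (([1], 1) : List Int × Int)]
  rw [show ((PySem.List.enumerate xs 0).filter (fun q => !((k:Int) == q.1))).foldl
        (fun (nd : List Int × Int) q => (poly_mul nd.1 [base_sub 0 q.2, 1], base_mul nd.2 (base_sub xs[k] q.2))) ([1], 1)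
      = ((((PySem.List.enumerate xs 0).filter (fun q => !((k:Int) == q.1))).map (fun q => q.2)).foldl
        (fun (nd : List Int × Int) x => (poly_mul nd.1 [base_sub 0 x, 1], base_mul nd.2 (base_sub xs[k] x))) ([1], 1))
      from (@List.foldl_map (ℤ × ℤ) ℤ (List ℤ × ℤ) (fun q => q.2)
        (fun nd x => (poly_mul nd.1 [base_sub 0 x, 1], base_mul nd.2 (base_sub xs[k] x)))
        ((PySem.List.enumerate xs 0).filter (fun q => !((k:Int) == q.1))) (([1], 1))).symm]
  rw [enum_sel xs k hk, ← hL,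
    PySem.List.foldl_prod_mk (fun (N : List ℤ) (x : ℤ) => poly_mul N [base_sub 0 x, 1])
      (fun (d : ℤ) (x : ℤ) => base_mul d (base_sub xs[k] x)) L [1] 1]
  -- numerator
  set N : List Int := L.foldl (fun A x => pvMulx A (nf x)) [1] with hN
  have hNgood : Good N := by
    rw [hN, show (L.foldl (fun A x => pvMulx A (nf x)) [1]) = ((L.map nf).foldl pvMulx [1]) from List.foldl_map.symm]
    exact good_fold _ _ good_one
  have hnum : L.foldl (fun A x => poly_mul A [base_sub 0 x, 1]) [1] = N := by
    rw [numer_fold L [1] good_one, hN]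
    exact List.foldl_ext _ _ _ (by intro A x _; rw [hneg x])
  rw [hnum]
  -- the full product is N with the factor for index k multiplied back on
  have hxs : xs = xs.take k ++ xs[k] :: xs.drop (k+1) := by
    conv_lhs => rw [← List.take_append_drop k xs, List.drop_eq_getElem_cons hk]
  have hfull : xs.foldl (fun A x => pvMulx A (nf x)) [1] = pvMulx N (nf xs[k]) := by
    rw [show (xs.foldl (fun A x => pvMulx A (nf x)) [1]) = ((xs.map nf).foldl pvMulx [1]) from List.foldl_map.symm]
    conv_lhs => rw [hxs]
    rw [List.map_append, List.map_cons, fold_middle _ _ _ _ good_one, ← List.map_append]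
    rw [hN, show (L.foldl (fun A x => pvMulx A (nf x)) [1]) = ((L.map nf).foldl pvMulx [1]) from List.foldl_map.symm]
  rw [hfull]
  -- synthetic division recovers N
  have hdvd : (19997:ℤ) ∣ (r + nf xs[k]) := by
    apply Int.dvd_of_emod_eq_zero
    rw [hr, hnf]
    simp only [pmod]
    rw [show ((0:ℤ) = 0 % 19997) from rfl]
    apply pvBridge; push_cast [pvCastMod]; ring
  have hQ : pvSynthdiv (pvMulx N (nf xs[k])) r = N :=
    synthdiv_pvMulx N r (nf xs[k]) hNgood.1 hNgood.2.1 hdvd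
  rw [hQ]
  -- denominator
  have hden : L.foldl (fun d x => base_mul d (base_sub xs[k] x)) 1 = pvEval N r := by
    rw [hN, show (L.foldl (fun A x => pvMulx A (nf x)) [1]) = ((L.map nf).foldl pvMulx [1]) from List.foldl_map.symm]
    rw [eval_fold (L.map nf) [1] r (by simp), eval_one, List.foldl_map]
    apply List.foldl_ext
    intro d x _
    simp only [base_mul, base_sub, hr, hnf, pmod]
    apply pvBridge; push_cast [pvCastMod]; ring
  rw [hden]
  -- scalar division: canonical = trim, and base_div is multiplication by the inverse
  simp only [poly_scalardiv, canonical_eq_trim, base_div, base_mul, pmod]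

-- ===== VERDICT (by name: the statement is the Claim_ definition above) =====
theorem lagrange_polynomials_spec : Claim_equal_lagrange_polynomials := by
  intro xs _
  unfold Spec_lagrange_polynomials lagrange_polynomials lagrange_polynomials_alt
  rw [PySem.List.foldl_append_singleton_eq_map, PySem.List.foldl_append_singleton_eq_map]
  simp only [List.nil_append]
  conv_rhs => rw [show xs = List.map (fun q => q.2) (PySem.List.enumerate xs 0) from (PySem.List.map_snd_enumerate xs 0).symm, List.map_map]
  apply List.map_congr_left
  intro p hp
  obtain ⟨k, hk, rfl⟩ := (PySem.List.mem_enumerate_iff xs 0 p).mp hp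
  simpa using basis_eq xs k hk
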